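-- pv_equiv track=rewrite | github.com/cthiounn/adventofcode-2015-python | day3.py | part1
-- ===== SOURCE A (Python) =====
-- def part1(vlines):
--     line=vlines[0]
--     x,y=0,0
--     my_set=set()
--     for s in line:
--         if s=='<':
--             x-=1
--         elif s=='>':
--             x+=1
--         elif s=='^':
--             y-=1
--         elif s=='v':
--             y+=1
--         my_set.add((x,y))
--     return my_set
-- ===== SOURCE B (Python) =====
-- def part1(vlines):
--     DX = {'<': -1, '>': 1}
--     DY = {'^': -1, 'v': 1}
--     line = vlines[0]
--     xs = []
--     x = 0
--     for c in line:
--         x += DX.get(c, 0)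
--         xs.append(x)
--     ys = []
--     y = 0
--     for c in line:
--         y += DY.get(c, 0)
--         ys.append(y)
--     return set(zip(xs, ys))
-- ===== Notes on version B (the rewrite author's own statement) =====
-- stated objective: alternative
-- what changed: Replaces the stateful if/elif walk that mutates (x,y) and a set per step with two independent component-wise prefix-sum passes driven by delta dicts, zipped into positions and turned into a set once at the end.
import Mathlib
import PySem

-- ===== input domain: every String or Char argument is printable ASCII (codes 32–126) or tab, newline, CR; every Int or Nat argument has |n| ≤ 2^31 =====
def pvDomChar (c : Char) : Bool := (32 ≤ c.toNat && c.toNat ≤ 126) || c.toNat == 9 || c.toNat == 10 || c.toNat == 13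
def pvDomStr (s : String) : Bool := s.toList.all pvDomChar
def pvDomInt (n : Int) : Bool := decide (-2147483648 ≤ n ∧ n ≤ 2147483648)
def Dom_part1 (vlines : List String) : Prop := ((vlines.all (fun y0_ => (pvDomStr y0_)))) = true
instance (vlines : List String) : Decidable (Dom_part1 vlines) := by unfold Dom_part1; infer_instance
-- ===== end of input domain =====

-- B computes the visited-position set as two component-wise prefix-sum passes zipped together,
-- instead of A's stateful if/elif walk; same O(n) cost, different decomposition.

-- ===== PORT A =====
def part1Step (st : (Int × Int) × PySem.Set (Int × Int)) (s : Char) : (Int × Int) × PySem.Set (Int × Int) :=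
  let x := st.1.1
  let y := st.1.2
  let p :=
    if s = '<' then (x - 1, y)
    else if s = '>' then (x + 1, y)
    else if s = '^' then (x, y - 1)
    else if s = 'v' then (x, y + 1)
    else (x, y)
  (p, st.2.add p)

def part1 (vlines : List String) : List (Int × Int) :=
  match PySem.List.pyGet? vlines 0 with
  | none => []   -- IndexError in Python; excluded by Pre_part1
  | some line => (line.toList.foldl part1Step ((0, 0), PySem.Set.empty)).2

-- ===== PORT B =====
def part1DX : PySem.Dict Char Int := PySem.Dict.ofList [('<', -1), ('>', 1)]
def part1DY : PySem.Dict Char Int := PySem.Dict.ofList [('^', -1), ('v', 1)]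

def part1XAcc (x : Int) : List Char → List Int
  | [] => []
  | c :: cs => let x' := x + PySem.Dict.getD part1DX c 0; x' :: part1XAcc x' cs

def part1YAcc (y : Int) : List Char → List Int
  | [] => []
  | c :: cs => let y' := y + PySem.Dict.getD part1DY c 0; y' :: part1YAcc y' cs

def part1_alt (vlines : List String) : List (Int × Int) :=
  match PySem.List.pyGet? vlines 0 with
  | none => []   -- IndexError in Python; excluded by Pre_part1
  | some line =>
    PySem.Set.ofList ((part1XAcc 0 line.toList).zip (part1YAcc 0 line.toList))

-- ===== PRECONDITION & SPEC =====
-- A (and B) index vlines[0]: the empty list raises IndexError and is excluded.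
def Pre_part1 (vlines : List String) : Prop := vlines ≠ []
instance (vlines : List String) : Decidable (Pre_part1 vlines) := by unfold Pre_part1; infer_instance
def pvWitness_part1 : List String := ["^>v<X"]

def Spec_part1 (vlines : List String) (out : List (Int × Int)) : Prop := out = part1_alt vlines
instance (vlines : List String) (out : List (Int × Int)) : Decidable (Spec_part1 vlines out) := by unfold Spec_part1; infer_instance

-- ===== CLAIM (what is proved, stated in full; the proofs are below) =====
def Claim_equal_part1 : Prop := ∀ (vlines : List String), Dom_part1 vlines → Pre_part1 vlines → Spec_part1 vlines (part1 vlines)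

-- ===== LEMMAS AND PROOFS =====
theorem part1DXgetD (c : Char) :
    PySem.Dict.getD part1DX c 0 = if c = '<' then -1 else if c = '>' then 1 else 0 := by
  have h : part1DX = PySem.Dict.mk [('<', -1), ('>', 1)] := by decide
  rw [h, PySem.Dict.getD]
  simp [PySem.Dict.get?_mk_cons]
  by_cases h1 : c = '<' <;> by_cases h2 : c = '>' <;> simp_all [eq_comm, PySem.Dict.get?]

theorem part1DYgetD (c : Char) :
    PySem.Dict.getD part1DY c 0 = if c = '^' then -1 else if c = 'v' then 1 else 0 := by
  have h : part1DY = PySem.Dict.mk [('^', -1), ('v', 1)] := by decide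
  rw [h, PySem.Dict.getD]
  simp [PySem.Dict.get?_mk_cons]
  by_cases h1 : c = '^' <;> by_cases h2 : c = 'v' <;> simp_all [eq_comm, PySem.Dict.get?]

theorem part1_fold_eq (cs : List Char) : ∀ (x y : Int) (s : PySem.Set (Int × Int)),
    (cs.foldl part1Step ((x, y), s)).2
      = ((part1XAcc x cs).zip (part1YAcc y cs)).foldl PySem.Set.add s := by
  induction cs with
  | nil => intro x y s; rfl
  | cons c cs ih =>
    intro x y s
    simp only [List.foldl, part1XAcc, part1YAcc, List.zip, List.zipWith, part1Step]
    by_cases h1 : c = '<'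
    · subst h1; simp [part1DXgetD, part1DYgetD, ih, List.zip, sub_eq_add_neg]
    by_cases h2 : c = '>'
    · subst h2; simp [h1, part1DXgetD, part1DYgetD, ih, List.zip, sub_eq_add_neg]
    by_cases h3 : c = '^'
    · subst h3; simp [h1, h2, part1DXgetD, part1DYgetD, ih, List.zip, sub_eq_add_neg]
    by_cases h4 : c = 'v'
    · subst h4; simp [h1, h2, h3, part1DXgetD, part1DYgetD, ih, List.zip, sub_eq_add_neg]
    · simp [h1, h2, h3, h4, part1DXgetD, part1DYgetD, ih, List.zip, sub_eq_add_neg]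

-- ===== VERDICT (by name: the statement is the Claim_ definition above) =====
theorem part1_spec : Claim_equal_part1 := by
  intro vlines _ _
  unfold Spec_part1 part1 part1_alt
  cases h : PySem.List.pyGet? vlines 0 with
  | none => rfl
  | some line =>
    simp only []
    rw [PySem.Set.ofList_eq_foldl, part1_fold_eq]; rfl
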